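-- pv_equiv track=rewrite | github.com/kyclark/advent2021 | python/day10/chunky2.py | remainder
-- ===== SOURCE A (Python) =====
-- def remainder(val: str) -> str:
--     """ Return unpaired chars, else empty string """
--
--     expected = {')': '(', '}': '{', ']': '[', '>': '<'}
--     opened = []
--     for char in list(val):
--         if char in '({[<':
--             opened.append(char)
--         elif char in ')}]>':
--             if opened and opened[-1] == expected[char]:
--                 opened.pop(-1)
--             else:
--                 return ''
--         else:
--             return ''
--
--     return ''.join(reversed(opened))
-- ===== SOURCE B (Python) =====
-- def remainder(val: str) -> str:
--     """ Return unpaired chars, else empty string """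
--     s = val
--     while True:
--         t = s.replace('()', '').replace('[]', '').replace('{}', '').replace('<>', '')
--         if t == s:
--             break
--         s = t
--     if all(c in '([{<' for c in s):
--         return s[::-1]
--     return ''
-- ===== Notes on version B (the rewrite author's own statement) =====
-- stated objective: alternative
-- what changed: Replaced A's single left-to-right stack pass with repeated str.replace elimination of the four adjacent matched bracket pairs until a fixpoint, then returning the reversed residue if it consists only of opening brackets and the empty string otherwise.
import Mathlib
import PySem

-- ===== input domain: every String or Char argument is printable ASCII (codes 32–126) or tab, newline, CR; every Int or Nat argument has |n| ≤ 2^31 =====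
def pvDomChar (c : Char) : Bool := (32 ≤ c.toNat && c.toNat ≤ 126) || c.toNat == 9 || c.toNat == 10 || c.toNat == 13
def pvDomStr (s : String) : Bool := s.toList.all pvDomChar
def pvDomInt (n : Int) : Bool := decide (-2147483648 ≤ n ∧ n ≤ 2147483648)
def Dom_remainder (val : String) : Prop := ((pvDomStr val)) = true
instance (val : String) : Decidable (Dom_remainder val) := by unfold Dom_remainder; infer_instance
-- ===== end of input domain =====

-- B replaces A's single left-to-right stack pass by repeated elimination of adjacent
-- matched bracket pairs to a fixpoint, then a shape test on the residue (objective: alternative).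

-- ===== PORT A =====
-- expected[char]: the literal dict {')': '(', '}': '{', ']': '[', '>': '<'};
-- A only ever looks it up at the four closer keys.
def expectedA (c : Char) : Char :=
  if c = ')' then '(' else if c = '}' then '{' else if c = ']' then '[' else '<'

-- the for-loop of A: state is 'opened'; each early `return ''` becomes returning "".
def remainderLoop : List Char → List Char → String
  | [], opened => String.mk opened.reverse          -- ''.join(reversed(opened))
  | c :: rest, opened =>
    if c ∈ ['(', '{', '[', '<'] then remainderLoop rest (opened ++ [c])
    else if c ∈ [')', '}', ']', '>'] then
      match opened.getLast? with                    -- 'opened and opened[-1] == expected[char]'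
      | some t => if t = expectedA c then remainderLoop rest opened.dropLast else ""
      | none => ""
    else ""

def remainder (val : String) : String := remainderLoop val.toList []

-- ===== PORT B =====
-- s.replace(ab, '') for a two-character pattern ab: remove non-overlapping
-- occurrences left to right (exact hand port of str.replace for this pattern shape).
def rem2 (a b : Char) : List Char → List Char
  | [] => []
  | [c] => [c]
  | c :: d :: rest =>
    if c = a ∧ d = b then rem2 a b rest else c :: rem2 a b (d :: rest)

-- the chain of the four .replace calls in one iteration of B's while-loop
def rem4 (s : List Char) : List Char :=
  rem2 '<' '>' (rem2 '{' '}' (rem2 '[' ']' (rem2 '(' ')' s)))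

theorem rem2_len_le (a b : Char) (l : List Char) : (rem2 a b l).length ≤ l.length := by
  induction l using rem2.induct a b with
  | case1 => simp [rem2]
  | case2 => simp [rem2]
  | case3 c d rest hp ih => simp only [rem2, if_pos hp]; simp; omega
  | case4 c d rest hp ih => simp only [rem2, if_neg hp] at ih ⊢; simp at ih ⊢; omega

theorem rem2_len_eq_fix (a b : Char) (l : List Char)
    (h : (rem2 a b l).length = l.length) : rem2 a b l = l := by
  induction l using rem2.induct a b with
  | case1 => rfl
  | case2 => rfl
  | case3 c d rest hc ih =>
    exfalso
    have := rem2_len_le a b rest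
    simp only [rem2, if_pos hc] at h
    simp at h; omega
  | case4 c d rest hc ih =>
    simp only [rem2, if_neg hc] at h ⊢
    simp at h
    rw [ih h]

theorem rem4_fix_stages (s : List Char) (h : (rem4 s).length = s.length) :
    rem2 '(' ')' s = s ∧ rem2 '[' ']' s = s ∧ rem2 '{' '}' s = s ∧ rem2 '<' '>' s = s := by
  have h1 := rem2_len_le '(' ')' s
  have h2 := rem2_len_le '[' ']' (rem2 '(' ')' s)
  have h3 := rem2_len_le '{' '}' (rem2 '[' ']' (rem2 '(' ')' s))
  have h4 := rem2_len_le '<' '>' (rem2 '{' '}' (rem2 '[' ']' (rem2 '(' ')' s)))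
  unfold rem4 at h
  have e1 : rem2 '(' ')' s = s := rem2_len_eq_fix _ _ _ (by omega)
  rw [e1] at h h2 h3 h4 ⊢
  have e2 : rem2 '[' ']' s = s := rem2_len_eq_fix _ _ _ (by omega)
  rw [e2] at h h3 h4 ⊢
  have e3 : rem2 '{' '}' s = s := rem2_len_eq_fix _ _ _ (by omega)
  rw [e3] at h h4 ⊢
  have e4 : rem2 '<' '>' s = s := rem2_len_eq_fix _ _ _ (by omega)
  exact ⟨rfl, rfl, rfl, e4⟩

theorem rem4_len_lt (s : List Char) (h : rem4 s ≠ s) : (rem4 s).length < s.length := by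
  have le : (rem4 s).length ≤ s.length := by
    have h1 := rem2_len_le '(' ')' s
    have h2 := rem2_len_le '[' ']' (rem2 '(' ')' s)
    have h3 := rem2_len_le '{' '}' (rem2 '[' ']' (rem2 '(' ')' s))
    have h4 := rem2_len_le '<' '>' (rem2 '{' '}' (rem2 '[' ']' (rem2 '(' ')' s)))
    unfold rem4; omega
  rcases lt_or_eq_of_le le with hlt | heq
  · exact hlt
  · exfalso
    obtain ⟨e1, e2, e3, e4⟩ := rem4_fix_stages s heq
    exact h (by unfold rem4; rw [e1, e2, e3, e4])

-- the while-loop of B: reduce until the replaces change nothing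
def loopReduce (s : List Char) : List Char :=
  if h : rem4 s = s then s else loopReduce (rem4 s)
termination_by s.length
decreasing_by exact rem4_len_lt s h

def remainder_alt (val : String) : String :=
  let r := loopReduce val.toList
  if r.all (· ∈ ['(', '[', '{', '<']) then String.mk r.reverse else ""

-- ===== PRECONDITION & SPEC =====
def Spec_remainder (val : String) (out : String) : Prop := out = remainder_alt val
instance (val : String) (out : String) : Decidable (Spec_remainder val out) := by unfold Spec_remainder; infer_instance

-- ===== CLAIM (what is proved, stated in full; the proofs are below) =====
def Claim_equal_remainder : Prop := ∀ (val : String), Dom_remainder val → Spec_remainder val (remainder val)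

-- ===== LEMMAS AND PROOFS =====

-- removing one kind of adjacent matched pair anywhere does not change A's run
theorem remLoop_rem2 (a b : Char) (ha : a ∈ ['(', '{', '[', '<'])
    (hb : b ∈ [')', '}', ']', '>']) (hba : expectedA b = a) :
    ∀ l : List Char, ∀ st, remainderLoop (rem2 a b l) st = remainderLoop l st := by
  intro l
  induction l using rem2.induct a b with
  | case1 => intro st; rfl
  | case2 => intro st; rfl
  | case3 c d rest hc ih =>
    intro st
    obtain ⟨rfl, rfl⟩ := hc
    have hnd : d ∉ ['(', '{', '[', '<'] := by fin_cases hb <;> decide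
    rw [show rem2 c d (c :: d :: rest) = rem2 c d rest by simp [rem2]]
    rw [ih st]
    conv_rhs => rw [remainderLoop]
    simp only [if_pos ha]
    conv_rhs => rw [remainderLoop]
    simp only [if_neg hnd, if_pos hb]
    rw [List.getLast?_concat, hba]
    simp
  | case4 c d rest hc ih =>
    intro st
    rw [show rem2 a b (c :: d :: rest) = c :: rem2 a b (d :: rest) by simp [rem2, hc]]
    rw [remainderLoop]
    conv_rhs => rw [remainderLoop]
    by_cases hop : c ∈ ['(', '{', '[', '<']
    · simp only [if_pos hop]; exact ih _
    · simp only [if_neg hop]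
      by_cases hcl : c ∈ [')', '}', ']', '>']
      · simp only [if_pos hcl]
        cases st.getLast? with
        | none => rfl
        | some t =>
          by_cases ht : t = expectedA c
          · simp only [ht]; exact ih _
          · simp [ht]
      · simp [hcl]

theorem remLoop_rem4 (l : List Char) (st : List Char) :
    remainderLoop (rem4 l) st = remainderLoop l st := by
  unfold rem4
  rw [remLoop_rem2 '<' '>' (by simp) (by simp) (by decide)]
  rw [remLoop_rem2 '{' '}' (by simp) (by simp) (by decide)]
  rw [remLoop_rem2 '[' ']' (by simp) (by simp) (by decide)]
  rw [remLoop_rem2 '(' ')' (by simp) (by simp) (by decide)]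

theorem remLoop_loopReduce (l : List Char) (st : List Char) :
    remainderLoop (loopReduce l) st = remainderLoop l st := by
  unfold loopReduce
  split
  · rfl
  · rw [remLoop_loopReduce (rem4 l) st, remLoop_rem4]
termination_by l.length
decreasing_by exact rem4_len_lt l (by assumption)

theorem loopReduce_fix (l : List Char) : rem4 (loopReduce l) = loopReduce l := by
  unfold loopReduce
  split
  · assumption
  · exact loopReduce_fix (rem4 l)
termination_by l.length
decreasing_by exact rem4_len_lt l (by assumption)

-- irreducibility: fixed by every one of the four replaces
def Irr (l : List Char) : Prop :=
  rem2 '(' ')' l = l ∧ rem2 '[' ']' l = l ∧ rem2 '{' '}' l = l ∧ rem2 '<' '>' l = l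

theorem irr_loopReduce (l : List Char) : Irr (loopReduce l) := by
  have h := loopReduce_fix l
  exact rem4_fix_stages _ (by rw [h])

theorem rem2_fix_tail (a b c : Char) (l : List Char)
    (h : rem2 a b (c :: l) = c :: l) : rem2 a b l = l := by
  cases l with
  | nil => rfl
  | cons d rest =>
    by_cases hp : c = a ∧ d = b
    · exfalso
      rw [show rem2 a b (c :: d :: rest) = rem2 a b rest by simp [rem2, hp]] at h
      have := rem2_len_le a b rest
      have : (rem2 a b rest).length = (c :: d :: rest).length := by rw [h]
      simp at this; omega
    · rw [show rem2 a b (c :: d :: rest) = c :: rem2 a b (d :: rest) by simp [rem2, hp]] at h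
      exact List.cons_injective h |> fun e => e

theorem irr_tail (c : Char) (l : List Char) (h : Irr (c :: l)) : Irr l :=
  ⟨rem2_fix_tail _ _ _ _ h.1, rem2_fix_tail _ _ _ _ h.2.1,
   rem2_fix_tail _ _ _ _ h.2.2.1, rem2_fix_tail _ _ _ _ h.2.2.2⟩

theorem not_fix_head_pair (a b : Char) (rest : List Char) :
    rem2 a b (a :: b :: rest) ≠ a :: b :: rest := by
  intro h
  rw [show rem2 a b (a :: b :: rest) = rem2 a b rest by simp [rem2]] at h
  have := rem2_len_le a b rest
  have : (rem2 a b rest).length = (a :: b :: rest).length := by rw [h]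
  simp at this; omega

-- a run over an all-open residue just pushes everything
theorem remLoop_allOpen : ∀ l st, l.all (· ∈ ['(', '[', '{', '<']) →
    remainderLoop l st = String.mk (st ++ l).reverse := by
  intro l
  induction l with
  | nil => intro st _; simp [remainderLoop]
  | cons c rest ih =>
    intro st h
    simp only [List.all_cons, Bool.and_eq_true] at h
    have hc : c ∈ ['(', '{', '[', '<'] := by
      have := h.1; simp at this ⊢; tauto
    rw [remainderLoop]
    simp only [if_pos hc]
    rw [ih _ h.2]
    simp

-- core: an irreducible residue that is not all-open makes A's run return ''
theorem remLoop_irr_core : ∀ (l : List Char) (c : Char) (st : List Char),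
    Irr (c :: l) → c ∈ ['(', '{', '[', '<'] →
    ¬ (l.all (· ∈ ['(', '[', '{', '<']) = true) →
    remainderLoop l (st ++ [c]) = "" := by
  intro l
  induction l with
  | nil => intro c st _ _ hno; exact absurd rfl hno
  | cons d rest ih =>
    intro c st hirr hc hno
    rw [remainderLoop]
    by_cases hop : d ∈ ['(', '{', '[', '<']
    · simp only [if_pos hop]
      have hno' : ¬ (rest.all (· ∈ ['(', '[', '{', '<']) = true) := by
        intro hr
        apply hno
        simp only [List.all_cons, Bool.and_eq_true]
        refine ⟨?_, hr⟩
        simp at hop ⊢; tauto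
      exact ih d (st ++ [c]) (irr_tail _ _ hirr) hop hno'
    · simp only [if_neg hop]
      by_cases hcl : d ∈ [')', '}', ']', '>']
      · simp only [if_pos hcl]
        rw [List.getLast?_concat]
        by_cases ht : c = expectedA d
        · exfalso
          -- then (c, d) is one of the four matched pairs, contradicting irreducibility
          obtain ⟨i1, i2, i3, i4⟩ := hirr
          fin_cases hcl <;> simp [expectedA] at ht <;> subst ht
          · exact not_fix_head_pair _ _ rest i1
          · exact not_fix_head_pair _ _ rest i3
          · exact not_fix_head_pair _ _ rest i2
          · exact not_fix_head_pair _ _ rest i4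
        · simp [ht]
      · simp [hcl]

theorem remLoop_irr (l : List Char) (hirr : Irr l)
    (hno : ¬ (l.all (· ∈ ['(', '[', '{', '<']) = true)) :
    remainderLoop l [] = "" := by
  cases l with
  | nil => exact absurd rfl hno
  | cons c rest =>
    rw [remainderLoop]
    by_cases hop : c ∈ ['(', '{', '[', '<']
    · simp only [if_pos hop]
      have hno' : ¬ (rest.all (· ∈ ['(', '[', '{', '<']) = true) := by
        intro hr
        apply hno
        simp only [List.all_cons, Bool.and_eq_true]
        refine ⟨?_, hr⟩
        simp at hop ⊢; tauto
      have := remLoop_irr_core rest c [] hirr hop hno'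
      simpa using this
    · simp only [if_neg hop]
      by_cases hcl : c ∈ [')', '}', ']', '>']
      · simp [hcl]
      · simp [hcl]

-- ===== VERDICT (by name: the statement is the Claim_ definition above) =====
theorem remainder_spec : Claim_equal_remainder := by
  intro val _
  unfold Spec_remainder remainder remainder_alt
  rw [← remLoop_loopReduce val.toList []]
  by_cases h : (loopReduce val.toList).all (· ∈ ['(', '[', '{', '<']) = true
  · rw [remLoop_allOpen _ [] h, if_pos h]
    simp
  · rw [remLoop_irr _ (irr_loopReduce val.toList) h, if_neg h]
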